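-- pv_equiv track=rewrite | github.com/koii-network/prometheus-beta | src/consecutive_character_sum.py | max_consecutive_character_sum
-- ===== SOURCE A (Python) =====
-- def max_consecutive_character_sum(input_string):
--     """
--     Calculate the maximum sum of consecutive characters that are also consecutive in the input string.
--
--     Args:
--         input_string (str): The input string to analyze
--
--     Returns:
--         int: The maximum sum of consecutive characters
--     """
--     if not input_string:
--         return 0
--
--     # Convert string to characters
--     chars = list(input_string)
--
--     # Track current sum and max sum
--     current_sum = ord(chars[0])
--     max_sum = current_sum
--
--     # Iterate through characters starting from the second character
--     for i in range(1, len(chars)):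
--         # Check if current character is consecutive with the previous character
--         if ord(chars[i]) == ord(chars[i-1]) + 1:
--             # If consecutive, add to current sum
--             current_sum += ord(chars[i])
--         else:
--             # If not consecutive, reset current sum
--             current_sum = ord(chars[i])
--
--         # Update max sum if current sum is larger
--         max_sum = max(max_sum, current_sum)
--
--     return max_sum
-- ===== SOURCE B (Python) =====
-- def max_consecutive_character_sum(input_string):
--     # Scan run boundaries and compute each maximal run's ordinal sum in CLOSED
--     # FORM (arithmetic series: L*start + L*(L-1)//2) instead of adding char
--     # ordinals one by one; then take the max of the run sums.
--     if not input_string: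
--         return 0
--     sums = []
--     i, n = 0, len(input_string)
--     while i < n:
--         start = ord(input_string[i])
--         prev = start
--         j = i + 1
--         while j < n and ord(input_string[j]) == prev + 1:
--             prev += 1
--             j += 1
--         L = j - i
--         sums.append(L * start + L * (L - 1) // 2)
--         i = j
--     return max(sums)
-- ===== Notes on version B (the rewrite author's own statement) =====
-- stated objective: alternative
-- what changed: B scans for run boundaries and computes each maximal run's ordinal sum by the closed-form arithmetic-series formula L*start + L*(L-1)//2 from the run's start ordinal and length, then takes max over the run sums, instead of A's per-character running-sum with an interleaved running max.
import Mathlib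
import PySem

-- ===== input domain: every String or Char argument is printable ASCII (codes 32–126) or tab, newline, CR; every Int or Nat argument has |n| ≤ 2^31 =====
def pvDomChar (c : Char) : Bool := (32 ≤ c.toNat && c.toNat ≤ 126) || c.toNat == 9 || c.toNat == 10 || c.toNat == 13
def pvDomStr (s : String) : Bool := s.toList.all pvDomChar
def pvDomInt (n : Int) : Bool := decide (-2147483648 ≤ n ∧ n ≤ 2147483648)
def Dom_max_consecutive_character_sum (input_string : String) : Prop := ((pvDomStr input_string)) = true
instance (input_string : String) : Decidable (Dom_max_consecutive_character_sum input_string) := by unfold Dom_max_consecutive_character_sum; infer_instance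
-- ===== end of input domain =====

-- B computes each maximal run's ordinal sum in closed form (arithmetic series from the run's
-- start ordinal and length found by a boundary scan) and maxes over the run sums, instead of
-- A's per-character running sum with an interleaved running max; same cost, different algorithm.

-- ===== PORT A =====
-- A's loop over i in range(1, len) reading chars[i] and chars[i-1] is transcribed as a fold
-- over the tail carrying (current_sum, max_sum, previous ordinal).
def pvStepA (st : Int × Int × Int) (ch : Char) : Int × Int × Int :=
  let o : Int := ch.toNat
  let cur' := if o = st.2.2 + 1 then st.1 + o else o
  (cur', max st.2.1 cur', o)

def max_consecutive_character_sum (input_string : String) : Int :=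
  match input_string.toList with
  | [] => 0
  | c :: rest =>
    let o0 : Int := c.toNat
    (rest.foldl pvStepA (o0, o0, o0)).2.1

-- ===== PORT B =====
-- Source B's inner while: length of the maximal consecutive run continuing after ordinal prev
def pvRunLen : Int → List Char → Nat
  | _, [] => 0
  | prev, c :: t => if (c.toNat : Int) = prev + 1 then 1 + pvRunLen (prev + 1) t else 0

-- Source B's outer while: one closed-form run sum per maximal run; L*(L-1)//2 is Nat division
-- here, exact w.r.t. Python's // since L ≥ 1 makes L*(L-1) ≥ 0.
def pvRuns : List Char → List Int
  | [] => []
  | c :: t =>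
    let a : Int := c.toNat
    let k := pvRunLen a t
    (((k : Int) + 1) * a + (((k + 1) * k / 2 : Nat) : Int)) :: pvRuns (t.drop k)
termination_by l => l.length
decreasing_by simp [List.length_drop]

-- max(sums) over the nonempty run-sum list (0 for the empty string, Source B's early return)
def max_consecutive_character_sum_alt (input_string : String) : Int :=
  match pvRuns input_string.toList with
  | [] => 0
  | r :: rs => rs.foldl max r

-- ===== PRECONDITION & SPEC =====
def Spec_max_consecutive_character_sum (input_string : String) (out : Int) : Prop := out = max_consecutive_character_sum_alt input_string
instance (input_string : String) (out : Int) : Decidable (Spec_max_consecutive_character_sum input_string out) := by unfold Spec_max_consecutive_character_sum; infer_instance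

-- ===== CLAIM (what is proved, stated in full; the proofs are below) =====
def Claim_equal_max_consecutive_character_sum : Prop := ∀ (input_string : String), Dom_max_consecutive_character_sum input_string → Spec_max_consecutive_character_sum input_string (max_consecutive_character_sum input_string)

-- ===== LEMMAS AND PROOFS =====

-- intermediate semantics both ports are related to: pvG cur prev t = max over the run sums of
-- t, the first (partial) run continuing cur after ordinal prev, each run counted by its total
def pvG : Int → Int → List Char → Int
  | cur, _, [] => cur
  | cur, prev, c :: t =>
    let o : Int := c.toNat
    if o = prev + 1 then pvG (cur + o) o t else max cur (pvG o o t)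

-- sum of the k ordinals prev+1, …, prev+k
def pvS : Int → Nat → Int
  | _, 0 => 0
  | prev, k + 1 => (prev + 1) + pvS (prev + 1) k

lemma pvG_ge (t : List Char) : ∀ cur prev : Int, cur ≤ pvG cur prev t := by
  induction t with
  | nil => intro cur prev; simp [pvG]
  | cons c t ih =>
    intro cur prev
    simp only [pvG]
    split_ifs with h
    · have := ih (cur + (c.toNat : Int)) (c.toNat : Int)
      have : (0 : Int) ≤ (c.toNat : Int) := Int.natCast_nonneg _
      have := ih (cur + (c.toNat : Int)) (c.toNat : Int)
      omega
    · exact le_max_left _ _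

-- A's fold computes max m (pvG cur prev t) whenever cur ≤ m
lemma pvA_eq (t : List Char) : ∀ cur m prev : Int, cur ≤ m →
    (t.foldl pvStepA (cur, m, prev)).2.1 = max m (pvG cur prev t) := by
  induction t with
  | nil => intro cur m prev h; simp [pvG]; omega
  | cons c t ih =>
    intro cur m prev h
    simp only [List.foldl, pvStepA, pvG]
    split_ifs with hc
    · rw [ih (cur + c.toNat) (max m (cur + c.toNat)) _ (le_max_right _ _)]
      have h1 : cur + (c.toNat : Int) ≤ pvG (cur + c.toNat) (c.toNat : Int) t := pvG_ge _ _ _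
      omega
    · rw [ih (c.toNat) (max m (c.toNat)) _ (le_max_right _ _)]
      have h1 : ((c.toNat : Nat) : Int) ≤ pvG (c.toNat) (c.toNat : Int) t := pvG_ge _ _ _
      omega

lemma pvRuns_nil : pvRuns [] = [] := by rw [pvRuns]

-- unfolding equation for pvRuns on a cons (well-founded recursion)
lemma pvRuns_cons (c : Char) (t : List Char) :
    pvRuns (c :: t) =
      (((pvRunLen (c.toNat : Int) t : Int) + 1) * (c.toNat : Int)
        + ((((pvRunLen (c.toNat : Int) t) + 1) * (pvRunLen (c.toNat : Int) t) / 2 : Nat) : Int))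
      :: pvRuns (t.drop (pvRunLen (c.toNat : Int) t)) := by
  rw [pvRuns]

-- the consecutive-sum recurrence in closed form
lemma pvS_closed (k : Nat) : ∀ prev : Int, pvS prev k = (k : Int) * prev + ((k * (k + 1) / 2 : Nat) : Int) := by
  induction k with
  | zero => intro prev; simp [pvS]
  | succ k ih =>
    intro prev
    have hmul : (k + 1) * (k + 2) = k * (k + 1) + 2 * (k + 1) := by ring
    have he : 2 ∣ k * (k + 1) := (Nat.even_mul_succ_self k).two_dvd
    have hn : (k + 1) * (k + 2) / 2 = (k + 1) + k * (k + 1) / 2 := by omega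
    simp only [pvS, ih]
    push_cast [hn]
    ring

-- pvG splits at the first run boundary, the first run summed by pvS
lemma pvG_runs (t : List Char) : ∀ cur prev : Int,
    pvG cur prev t =
      match t.drop (pvRunLen prev t) with
      | [] => cur + pvS prev (pvRunLen prev t)
      | c' :: t' => max (cur + pvS prev (pvRunLen prev t)) (pvG (c'.toNat : Int) (c'.toNat : Int) t') := by
  induction t with
  | nil => intro cur prev; simp [pvG, pvRunLen, pvS]
  | cons c t ih =>
    intro cur prev
    simp only [pvG, pvRunLen]
    split_ifs with h
    · rw [h, Nat.add_comm 1 (pvRunLen (prev + 1) t), List.drop_succ_cons,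
        show ∀ k, pvS prev (k + 1) = (prev + 1) + pvS (prev + 1) k from fun k => rfl]
      rw [ih (cur + (prev + 1)) (prev + 1)]
      cases hd : t.drop (pvRunLen (prev + 1) t) with
      | nil => simp only; ring
      | cons c' t' => simp only; congr 1; ring
    · simp [pvS]

-- folding max from a seed (max a b) pulls a out front
lemma pv_foldl_max_pull (l : List Int) : ∀ a b : Int,
    List.foldl max (max a b) l = max a (List.foldl max b l) := by
  induction l with
  | nil => intro a b; rfl
  | cons c l ih =>
    intro a b
    simp only [List.foldl]
    rw [max_assoc a b c, ih]

-- pvG on a fresh run equals B's max over pvRuns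
lemma pvG_pyMax : ∀ (n : Nat) (c : Char) (t : List Char), t.length ≤ n →
    pvG (c.toNat : Int) (c.toNat : Int) t =
      (match pvRuns (c :: t) with
       | [] => (0 : Int)
       | r :: rs => rs.foldl max r) := by
  intro n
  induction n with
  | zero =>
    intro c t ht
    have ht0 : t = [] := List.eq_nil_of_length_eq_zero (Nat.le_zero.mp ht)
    subst ht0
    simp [pvG, pvRuns_cons, pvRuns_nil, pvRunLen]
  | succ n ih =>
    intro c t ht
    rw [pvG_runs, pvRuns_cons]
    set k := pvRunLen (c.toNat : Int) t with hk
    have hsum : (c.toNat : Int) + pvS (c.toNat : Int) k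
        = ((k : Int) + 1) * (c.toNat : Int) + (((k + 1) * k / 2 : Nat) : Int) := by
      rw [pvS_closed]
      rw [Nat.mul_comm k (k + 1)]
      push_cast
      ring
    cases hd : t.drop k with
    | nil => simp only [pvRuns_nil, List.foldl]; exact hsum
    | cons c' t' =>
      have hlen : t'.length ≤ n := by
        have h1 : (t.drop k).length = t.length - k := List.length_drop
        rw [hd] at h1
        simp only [List.length_cons] at h1
        omega
      simp only
      rw [ih c' t' hlen, pvRuns_cons]
      simp only [List.foldl]
      rw [← hsum, pv_foldl_max_pull]

-- ===== VERDICT (by name: the statement is the Claim_ definition above) =====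
theorem max_consecutive_character_sum_spec : Claim_equal_max_consecutive_character_sum := by
  intro s _
  unfold Spec_max_consecutive_character_sum max_consecutive_character_sum max_consecutive_character_sum_alt
  cases hs : s.toList with
  | nil => simp [pvRuns_nil]
  | cons c rest =>
    simp only
    rw [pvA_eq rest (c.toNat) (c.toNat) (c.toNat) le_rfl,
        pvG_pyMax rest.length c rest le_rfl]
    have h1 : ((c.toNat : Nat) : Int) ≤ pvG (c.toNat) (c.toNat : Int) rest := pvG_ge _ _ _
    rw [pvG_pyMax rest.length c rest le_rfl] at h1
    omega
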